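-- pv_equiv track=rewrite | github.com/liuyubiao/test_1 | category/category_429.py | single_remove_format
-- ===== SOURCE A (Python) =====
-- def remove_contain_str(input_list):
--     '''
--     去除列表中被其他元素包含的元素
--     :param input_list:
--     :return:
--     '''
--     src_list = input_list
--     # 为了保证各个属性输出时的准确性，现在会对属性结果进行排序处理
--     input_list.sort(key=len, reverse=True)
--     tmp_out, filter_list = [], []
--     for s in input_list:
--         mask_list = [s in o for o in tmp_out]
--         if not any(mask_list):  # any函数全部为false才返回false
--             tmp_out.append(s)
--         else:
--             # 记录是因为那个元素的存在导致被过滤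
--             filter_list.append(s)
--
--     # 对out进行排序
--     out = [item for item in src_list if item in tmp_out]
--     return out, filter_list
--
-- def single_remove_format(result_data_list):
--     '''
--     对单list集合去重格式化
--     :param result_data_list:
--     :return:
--     '''
--     result_data_list = [item.strip() for item in result_data_list]
--     # 先按照出现次数排序之后再进行去重
--     result_data_list = sorted(result_data_list, key=lambda x: result_data_list.count(x), reverse=True)
--     # 这种去重方式会打乱顺序
--     # tmp_data_list = list(set(result_data_list))
--     tmp_data_list = sorted(set(result_data_list), key=result_data_list.index)
--
--     if tmp_data_list == None or len(tmp_data_list) == 0: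
--         tmp_data_list = []
--     else:
--         # 针对包含的内容再进行细分，包含情况也需要排除
--         tmp_data_list, _ = remove_contain_str(tmp_data_list)
--     return tmp_data_list
-- ===== SOURCE B (Python) =====
-- def single_remove_format(result_data_list):
--     stripped = [item.strip() for item in result_data_list]
--     # count every item once (dict counter) instead of calling list.count inside the sort key
--     cnt = {}
--     for s in stripped:
--         cnt[s] = cnt.get(s, 0) + 1
--     by_count = sorted(stripped, key=lambda s: cnt[s], reverse=True)
--     # de-duplicate keeping first occurrences (instead of sorted(set(...), key=.index))
--     uniq = []
--     for s in by_count: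
--         if s not in uniq:
--             uniq.append(s)
--     uniq.sort(key=len, reverse=True)
--     # order-independent all-pairs filter instead of the greedy kept-list scan
--     return [x for x in uniq if not any(x in y and y != x for y in uniq)]
-- ===== Notes on version B (the rewrite author's own statement) =====
-- stated objective: faster
-- what changed: B counts items once with a dict instead of calling list.count inside the sort key, de-duplicates with a first-occurrence loop instead of sorted(set(...), key=list.index), and replaces the greedy kept-list substring filter (plus its final re-filter pass) by an order-independent all-pairs filter: keep x iff no other unique item contains it.
import Mathlib
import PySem

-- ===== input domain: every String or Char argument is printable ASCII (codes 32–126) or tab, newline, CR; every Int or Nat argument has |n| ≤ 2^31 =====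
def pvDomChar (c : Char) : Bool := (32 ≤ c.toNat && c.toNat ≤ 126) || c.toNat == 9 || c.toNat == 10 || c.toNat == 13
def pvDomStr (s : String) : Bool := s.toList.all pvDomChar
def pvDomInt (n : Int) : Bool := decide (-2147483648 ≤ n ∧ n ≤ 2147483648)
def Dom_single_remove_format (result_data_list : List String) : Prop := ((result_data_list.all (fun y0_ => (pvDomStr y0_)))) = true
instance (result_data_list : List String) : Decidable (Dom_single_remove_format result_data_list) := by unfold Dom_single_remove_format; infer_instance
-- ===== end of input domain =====

-- B replaces A's O(n)-per-key list.count sort key by a counter dict built once, the sorted(set, key=index)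
-- dedup by a first-occurrence loop, and the greedy kept-list substring filter by an order-independent
-- all-pairs filter; objective: faster.

-- ===== PORT A =====
-- helper of A: sorts in place by length desc, greedily keeps items not contained in an already-kept item,
-- then re-filters the (sorted) source list by membership in the kept list.
def remove_contain_str (input_list : List String) : List String × List String :=
  let input_list := PySem.List.sorted input_list (fun s => PySem.Str.len s) true
  let p := input_list.foldl
    (fun (p : List String × List String) s =>
      if ((p.1.map (fun o => PySem.Str.isIn s o)).any (fun m => m)) then (p.1, p.2 ++ [s])
      else (p.1 ++ [s], p.2)) ([], [])
  let out := input_list.filter (fun item => p.1.contains item)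
  (out, p.2)

def single_remove_format (result_data_list : List String) : List String :=
  let result_data_list := result_data_list.map (fun item => PySem.Str.strip item)
  -- sorted(result_data_list, key=lambda x: result_data_list.count(x), reverse=True)
  let result_data_list2 := PySem.List.sorted result_data_list (fun x => (PySem.List.count result_data_list x : Int)) true
  -- sorted(set(result_data_list), key=result_data_list.index); .index never raises here (keys are members),
  -- so the total form (index? …).getD 0 is exact on every evaluated key
  let tmp_data_list := PySem.List.sorted (PySem.Set.ofList result_data_list2)
      (fun x => (PySem.List.index? result_data_list2 x).getD 0)
  if tmp_data_list = [] then []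
  else (remove_contain_str tmp_data_list).1

-- ===== PORT B =====
def single_remove_format_alt (result_data_list : List String) : List String :=
  let stripped := result_data_list.map (fun item => PySem.Str.strip item)
  -- count every item once (dict counter)
  let cnt := stripped.foldl (fun (d : PySem.Dict String Int) s => d.insert s (d.getD s 0 + 1)) PySem.Dict.empty
  let by_count := PySem.List.sorted stripped (fun s => cnt.getD s 0) true
  -- de-duplicate keeping first occurrences
  let uniq := by_count.foldl (fun (u : List String) s => if u.contains s then u else u ++ [s]) []
  let uniq2 := PySem.List.sorted uniq (fun s => PySem.Str.len s) true
  uniq2.filter (fun x => !(uniq2.any (fun y => PySem.Str.isIn x y && y != x)))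

-- ===== PRECONDITION & SPEC =====
def Spec_single_remove_format (result_data_list : List String) (out : List String) : Prop := out = single_remove_format_alt result_data_list
instance (result_data_list : List String) (out : List String) : Decidable (Spec_single_remove_format result_data_list out) := by unfold Spec_single_remove_format; infer_instance

-- ===== CLAIM (what is proved, stated in full; the proofs are below) =====
def Claim_equal_single_remove_format : Prop := ∀ (result_data_list : List String), Dom_single_remove_format result_data_list → Spec_single_remove_format result_data_list (single_remove_format result_data_list)

-- ===== LEMMAS AND PROOFS =====

-- B's keep-predicate: x survives iff no OTHER element of the list contains it
def Pb (L : List String) (x : String) : Bool := !(L.any (fun y => PySem.Str.isIn x y && y != x))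

-- string length as a Nat
def lenN (s : String) : Nat := s.toList.length

lemma isIn_infix {x y : String} (h : PySem.Str.isIn x y = true) : x.toList <:+: y.toList :=
  (PySem.Str.isIn_iff_infix x y).1 h

lemma lenN_lt_of_isIn_ne {x y : String} (h : PySem.Str.isIn x y = true) (hne : x ≠ y) :
    lenN x < lenN y := by
  have hsub := (isIn_infix h).sublist
  refine lt_of_le_of_ne hsub.length_le (fun he => hne ?_)
  exact String.toList_inj.mp (hsub.eq_of_length he)

lemma isIn_trans {x y z : String} (h1 : PySem.Str.isIn x y = true) (h2 : PySem.Str.isIn y z = true) :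
    PySem.Str.isIn x z = true :=
  (PySem.Str.isIn_iff_infix x z).2 ((isIn_infix h1).trans (isIn_infix h2))

lemma countP_lt_countP {α : Type} {p q : α → Bool} :
    ∀ {l : List α} {z : α}, z ∈ l → q z = true → p z = false →
      (∀ a ∈ l, p a = true → q a = true) → l.countP p < l.countP q := by
  intro l; induction l with
  | nil => intro z hz; simp at hz
  | cons a l ih =>
    intro z hz hq hp himp
    rcases List.mem_cons.1 hz with rfl | hzl
    · have hle : l.countP p ≤ l.countP q :=
        List.countP_mono_left (fun x hx => himp x (List.mem_cons_of_mem _ hx))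
      simp [hp, hq]; omega
    · have hlt := ih hzl hq hp (fun x hx => himp x (List.mem_cons_of_mem _ hx))
      by_cases hpa : p a = true
      · have hqa := himp a (List.mem_cons_self) hpa
        simp [hpa, hqa]; omega
      · simp only [Bool.not_eq_true] at hpa
        simp [List.countP_cons, hpa]
        split <;> omega

-- chasing containment upward in length: every contained element of pre is contained in a SURVIVOR of pre
lemma chase (L2 pre : List String)
    (closed : ∀ u z, u ∈ pre → z ∈ L2 → PySem.Str.isIn u z = true → z ≠ u → z ∈ pre) :
    ∀ (n : Nat) (y s : String), pre.countP (fun e => decide (lenN y < lenN e)) ≤ n →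
      y ∈ pre → PySem.Str.isIn s y = true → s ≠ y →
      ∃ o ∈ pre, Pb L2 o = true ∧ PySem.Str.isIn s o = true := by
  intro n
  induction n with
  | zero =>
    intro y s hcnt hy his hne
    by_cases hPy : Pb L2 y = true
    · exact ⟨y, hy, hPy, his⟩
    · exfalso
      simp only [Pb, Bool.not_eq_true', Bool.not_eq_false] at hPy
      rw [List.any_eq_true] at hPy
      obtain ⟨z, hzL, hz⟩ := hPy
      rw [Bool.and_eq_true, bne_iff_ne] at hz
      obtain ⟨hyz, hzny⟩ := hz
      have hzpre : z ∈ pre := closed y z hy hzL hyz hzny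
      have hlt : lenN y < lenN z := lenN_lt_of_isIn_ne hyz (Ne.symm hzny)
      have : 0 < pre.countP (fun e => decide (lenN y < lenN e)) := by
        rw [List.countP_pos_iff]; exact ⟨z, hzpre, by simp [hlt]⟩
      omega
  | succ n ih =>
    intro y s hcnt hy his hne
    by_cases hPy : Pb L2 y = true
    · exact ⟨y, hy, hPy, his⟩
    · simp only [Pb, Bool.not_eq_true', Bool.not_eq_false] at hPy
      rw [List.any_eq_true] at hPy
      obtain ⟨z, hzL, hz⟩ := hPy
      rw [Bool.and_eq_true, bne_iff_ne] at hz
      obtain ⟨hyz, hzny⟩ := hz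
      have hzpre : z ∈ pre := closed y z hy hzL hyz hzny
      have hyltz : lenN y < lenN z := lenN_lt_of_isIn_ne hyz (Ne.symm hzny)
      have hsy : lenN s < lenN y := lenN_lt_of_isIn_ne his hne
      have hsz : PySem.Str.isIn s z = true := isIn_trans his hyz
      have hnesz : s ≠ z := by
        intro h; subst h; omega
      have hdec : pre.countP (fun e => decide (lenN z < lenN e)) <
          pre.countP (fun e => decide (lenN y < lenN e)) := by
        apply countP_lt_countP hzpre (by simp [hyltz]) (by simp)
        intro a _ ha
        simp only [decide_eq_true_eq] at ha ⊢
        omega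
      exact ih z s (by omega) hzpre hsz hnesz


-- first occurrence indexes strictly increase along set(L)
lemma ofList_pairwise_idx (L : List String) :
    (PySem.Set.ofList L).Pairwise
      (fun a b => ((PySem.List.index? L a).getD 0 : Nat) < (PySem.List.index? L b).getD 0) := by
  induction L with
  | nil => simp [PySem.Set.ofList_nil]
  | cons x L ih =>
    rw [PySem.Set.ofList_cons]
    constructor
    · intro b hb
      obtain ⟨hbS, hbx⟩ := (PySem.Set.mem_discard _ _ _).1 hb
      have hbL : b ∈ L := (PySem.Set.mem_ofList L b).1 hbS
      obtain ⟨k, hk⟩ := Option.isSome_iff_exists.1 ((PySem.List.index?_isSome_iff L b).2 hbL)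
      rw [PySem.List.index?_cons_self, PySem.List.index?_cons_of_ne L (fun h => hbx h.symm), hk]
      simp
    · have hsub : ((PySem.Set.ofList L).discard x).Sublist (PySem.Set.ofList L) :=
        List.filter_sublist
      refine List.Pairwise.imp_of_mem ?_ (List.Pairwise.sublist hsub ih)
      intro a b ha hb hab
      obtain ⟨haS, hax⟩ := (PySem.Set.mem_discard _ _ _).1 ha
      obtain ⟨hbS, hbx⟩ := (PySem.Set.mem_discard _ _ _).1 hb
      obtain ⟨ka, hka⟩ := Option.isSome_iff_exists.1
        ((PySem.List.index?_isSome_iff L a).2 ((PySem.Set.mem_ofList L a).1 haS))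
      obtain ⟨kb, hkb⟩ := Option.isSome_iff_exists.1
        ((PySem.List.index?_isSome_iff L b).2 ((PySem.Set.mem_ofList L b).1 hbS))
      rw [PySem.List.index?_cons_of_ne L (fun h => hax h.symm),
        PySem.List.index?_cons_of_ne L (fun h => hbx h.symm), hka, hkb]
      rw [hka, hkb] at hab
      simpa using Nat.add_lt_add_right (by simpa using hab) 1


-- the greedy loop of remove_contain_str computes the all-pairs filter
lemma greedy_invariant (L2 : List String) (hnd : L2.Nodup)
    (hsort : L2.Pairwise (fun a b => lenN b ≤ lenN a)) :
    ∀ (rest pre acc fl : List String),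
      L2 = pre ++ rest → acc = pre.filter (Pb L2) →
      (rest.foldl (fun (p : List String × List String) s =>
        if ((p.1.map (fun o => PySem.Str.isIn s o)).any (fun m => m)) then (p.1, p.2 ++ [s])
        else (p.1 ++ [s], p.2)) (acc, fl)).1 = L2.filter (Pb L2) := by
  intro rest
  induction rest with
  | nil =>
    intro pre acc fl hL hacc
    rw [List.append_nil] at hL
    simp only [List.foldl_nil]
    rw [hacc, hL]
  | cons s rest ih =>
    intro pre acc fl hL hacc
    -- facts about the split
    have hsplit := hL ▸ hsort
    rw [List.pairwise_append] at hsplit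
    obtain ⟨hpre, hcons, hcross⟩ := hsplit
    have hrest : ∀ b ∈ rest, lenN b ≤ lenN s := (List.pairwise_cons.1 hcons).1
    have hnds := hL ▸ hnd
    have hsnotpre : s ∉ pre := by
      intro h
      exact (List.disjoint_of_nodup_append hnds) h (List.mem_cons_self)
    -- the loop condition equals ¬ Pb L2 s
    have hcond : (acc.map (fun o => PySem.Str.isIn s o)).any (fun m => m) = !(Pb L2 s) := by
      rw [List.any_map]
      by_cases hPs : Pb L2 s = true
      · rw [hPs]
        simp only [Bool.not_true]
        rw [List.any_eq_false]
        intro o ho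
        simp only [Function.comp] at ho ⊢
        rw [hacc, List.mem_filter] at ho
        obtain ⟨hopre, _⟩ := ho
        intro hio
        have hos : o ≠ s := fun h => hsnotpre (h ▸ hopre)
        have : ¬ (Pb L2 s = true) := by
          simp only [Pb, Bool.not_eq_true', Bool.not_eq_false]
          rw [List.any_eq_true]
          exact ⟨o, hL ▸ List.mem_append_left _ hopre, by rw [Bool.and_eq_true, bne_iff_ne]; exact ⟨hio, hos⟩⟩
        exact this hPs
      · simp only [Bool.not_eq_true] at hPs
        rw [hPs]
        simp only [Bool.not_false]
        rw [List.any_eq_true]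
        -- extract a witness y containing s
        have hPs' : (L2.any fun y => PySem.Str.isIn s y && y != s) = true := by
          cases hb : (L2.any fun y => PySem.Str.isIn s y && y != s) with
          | true => rfl
          | false =>
            exfalso
            have ht : Pb L2 s = true := by unfold Pb; rw [hb]; rfl
            rw [ht] at hPs
            exact Bool.noConfusion hPs
        rw [List.any_eq_true] at hPs'
        obtain ⟨y, hyL, hy⟩ := hPs'
        rw [Bool.and_eq_true, bne_iff_ne] at hy
        obtain ⟨hsy, hyns⟩ := hy
        have hslt : lenN s < lenN y := lenN_lt_of_isIn_ne hsy (Ne.symm hyns)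
        have hypre : y ∈ pre := by
          rcases List.mem_append.1 (hL ▸ hyL) with h | h
          · exact h
          · rcases List.mem_cons.1 h with rfl | h
            · exact absurd rfl hyns
            · have := hrest y h; omega
        have hlenpre : ∀ u ∈ pre, lenN s ≤ lenN u := fun u hu =>
          hcross u hu s (List.mem_cons_self)
        have hclosed : ∀ u z, u ∈ pre → z ∈ L2 → PySem.Str.isIn u z = true → z ≠ u → z ∈ pre := by
          intro u z hu hz hiz hzu
          have hzlt : lenN u < lenN z := lenN_lt_of_isIn_ne hiz (Ne.symm hzu)
          have hus := hlenpre u hu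
          rcases List.mem_append.1 (hL ▸ hz) with h | h
          · exact h
          · exfalso
            rcases List.mem_cons.1 h with rfl | h
            · omega
            · have := hrest z h; omega
        obtain ⟨o, hopre, hPo, hio⟩ :=
          chase L2 pre hclosed (pre.countP (fun e => decide (lenN y < lenN e))) y s
            le_rfl hypre hsy (Ne.symm hyns)
        exact ⟨o, by rw [hacc, List.mem_filter]; exact ⟨hopre, hPo⟩, by simpa using hio⟩
    -- one step of the loop
    by_cases hPs : Pb L2 s = true
    · rw [List.foldl_cons]
      have : ((acc.map (fun o => PySem.Str.isIn s o)).any (fun m => m)) = false := by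
        rw [hcond, hPs]; rfl
      rw [this]
      simp only [if_false, Bool.false_eq_true]
      exact ih (pre ++ [s]) (acc ++ [s]) fl (by rw [hL, List.append_assoc]; rfl)
        (by rw [hacc, List.filter_append]; simp [hPs])
    · rw [List.foldl_cons]
      simp only [Bool.not_eq_true] at hPs
      have : ((acc.map (fun o => PySem.Str.isIn s o)).any (fun m => m)) = true := by
        rw [hcond, hPs]; rfl
      rw [this]
      simp only [if_true]
      exact ih (pre ++ [s]) acc (fl ++ [s]) (by rw [hL, List.append_assoc]; rfl)
        (by rw [hacc, List.filter_append]; simp [hPs])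


lemma rcs_fst (U : List String) (hU : U.Nodup) :
    (remove_contain_str U).1 =
      (PySem.List.sorted U (fun s => PySem.Str.len s) true).filter
        (Pb (PySem.List.sorted U (fun s => PySem.Str.len s) true)) := by
  have hnd2 : (PySem.List.sorted U (fun s => PySem.Str.len s) true).Nodup :=
    (PySem.List.sorted_perm U _ true).nodup_iff.mpr hU
  have hsort' : (PySem.List.sorted U (fun s => PySem.Str.len s) true).Pairwise
      (fun a b => lenN b ≤ lenN a) := by
    refine (PySem.List.sorted_pairwise_rev U (fun s => PySem.Str.len s)).imp ?_
    intro a b h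
    rw [PySem.Str.len_eq, PySem.Str.len_eq] at h
    exact_mod_cast h
  have hfold : ((PySem.List.sorted U (fun s => PySem.Str.len s) true).foldl
      (fun (p : List String × List String) s =>
        if ((p.1.map (fun o => PySem.Str.isIn s o)).any (fun m => m)) then (p.1, p.2 ++ [s])
        else (p.1 ++ [s], p.2)) ([], [])).1 =
      (PySem.List.sorted U (fun s => PySem.Str.len s) true).filter
        (Pb (PySem.List.sorted U (fun s => PySem.Str.len s) true)) :=
    greedy_invariant _ hnd2 hsort' _ [] [] [] rfl rfl
  unfold remove_contain_str
  simp only []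
  rw [hfold]
  refine List.filter_congr ?_
  intro x hx
  simp [List.mem_filter]
  intro _
  simpa using hx

lemma ports_agree (L : List String) :
    single_remove_format L = single_remove_format_alt L := by
  unfold single_remove_format single_remove_format_alt
  simp only []
  -- the two sort keys agree: the dict counter equals list.count
  have hkeys : (fun s => ((L.map (fun item => PySem.Str.strip item)).foldl
        (fun (d : PySem.Dict String Int) s => d.insert s (d.getD s 0 + 1)) PySem.Dict.empty).getD s 0)
      = (fun x => (PySem.List.count (L.map (fun item => PySem.Str.strip item)) x : Int)) := by
    funext s
    rw [PySem.Dict.getD_foldl_insert_add_one]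
    simp [pysem]
  rw [hkeys]
  -- B's dedup loop is set(...) in first-occurrence order
  have huniq : ((PySem.List.sorted (L.map (fun item => PySem.Str.strip item))
        (fun x => (PySem.List.count (L.map (fun item => PySem.Str.strip item)) x : Int)) true).foldl
        (fun (u : List String) s => if u.contains s then u else u ++ [s]) [])
      = PySem.Set.ofList (PySem.List.sorted (L.map (fun item => PySem.Str.strip item))
        (fun x => (PySem.List.count (L.map (fun item => PySem.Str.strip item)) x : Int)) true) := by
    rw [PySem.Set.ofList_eq_foldl]; rfl
  rw [huniq]
  -- A's sorted(set(...), key=.index) is set(...) itself: first indexes strictly increase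
  have hidx : PySem.List.sorted (PySem.Set.ofList (PySem.List.sorted (L.map (fun item => PySem.Str.strip item))
        (fun x => (PySem.List.count (L.map (fun item => PySem.Str.strip item)) x : Int)) true))
      (fun x => (PySem.List.index? (PySem.List.sorted (L.map (fun item => PySem.Str.strip item))
        (fun x => (PySem.List.count (L.map (fun item => PySem.Str.strip item)) x : Int)) true) x).getD 0)
      = PySem.Set.ofList (PySem.List.sorted (L.map (fun item => PySem.Str.strip item))
        (fun x => (PySem.List.count (L.map (fun item => PySem.Str.strip item)) x : Int)) true) :=
    PySem.List.sorted_eq_of_perm_of_pairwise_lt _ _ _ (List.Perm.refl _) (ofList_pairwise_idx _)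
  rw [hidx]
  by_cases hnil : PySem.Set.ofList (PySem.List.sorted (L.map (fun item => PySem.Str.strip item))
      (fun x => (PySem.List.count (L.map (fun item => PySem.Str.strip item)) x : Int)) true) = []
  · rw [hnil]
    simp
  · rw [if_neg hnil]
    rw [rcs_fst _ (PySem.Set.nodup_ofList _)]
    rfl

-- ===== VERDICT (by name: the statement is the Claim_ definition above) =====
theorem single_remove_format_spec : Claim_equal_single_remove_format := by
  intro L _
  unfold Spec_single_remove_format
  exact ports_agree L
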